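-- pv_equiv track=rewrite | github.com/TannerFry/CASPER_alg_tool | SeqFinder.py | find_pams
-- ===== SOURCE A (Python) =====
-- def reverse_complement(seq):
--     seq = seq[::-1]
--     reverse_comp_seq = ""
--     for char in seq:
--         if char == "A":
--             reverse_comp_seq += "T"
--         elif char == "T":
--             reverse_comp_seq += "A"
--         elif char ==  "C":
--             reverse_comp_seq += "G"
--         elif char == "G":
--             reverse_comp_seq += "C"
--     return reverse_comp_seq
--
-- def get_pams(pam):
--     if pam == "NGG":
--         return  ["AGG", "GGG", "TGG", "CGG"]
--     elif pam == "TTTV":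
--         return ["TTTA", "TTTC","TTTG"]
--     else:
--         return []
--
-- def find_pams(organism_data, pam):
--     #hardcoding spCas9 pams for now
--     pams = get_pams(pam)
--
--     #pam_locations will store the indexes of the first letter of the pams found for each chromosome section
--     pam_locations = {}
--     pam_locations_reverse_comp = {}
--
--     #formard passthrough
--     for chromosome in organism_data.keys():
--         pam_locations[chromosome]= []
--         for i in range(0, len(organism_data[chromosome])-len(pam)-1):
--             if organism_data[chromosome][i:i+len(pam)] in pams:
--                 pam_locations[chromosome].append(i)
--
--     #reverse complement passthrough
--     for chromosome in organism_data.keys():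
--         pam_locations_reverse_comp[chromosome]= []
--         reverse_comp_data = reverse_complement(organism_data[chromosome])
--
--         for i in range(0, len(reverse_comp_data)-len(pam)-1):
--             if reverse_comp_data[i:i+len(pam)] in pams:
--                 pam_locations_reverse_comp[chromosome].append(i)
--
--     return pam_locations, pam_locations_reverse_comp
-- ===== SOURCE B (Python) =====
-- def find_pams(organism_data, pam):
--     pams = get_pams(pam)
--     comp = {"A": "T", "T": "A", "C": "G", "G": "C"}
--
--     def reverse_complement(seq):
--         return "".join(comp.get(c, "") for c in reversed(seq))
--
--     def scan(data):
--         # per-pattern str.find loop instead of a per-position window scan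
--         limit = len(data) - len(pam) - 1
--         hits = []
--         for p in pams:
--             pos = 0
--             while True:
--                 idx = data.find(p, pos)
--                 if idx == -1 or idx >= limit:
--                     break
--                 hits.append(idx)
--                 pos = idx + 1
--         hits.sort()
--         return hits
--
--     fwd = {chrom: scan(data) for chrom, data in organism_data.items()}
--     rev = {chrom: scan(reverse_complement(data)) for chrom, data in organism_data.items()}
--     return fwd, rev
--
--
-- def get_pams(pam):
--     if pam == "NGG":
--         return ["AGG", "GGG", "TGG", "CGG"]
--     elif pam == "TTTV":
--         return ["TTTA", "TTTC", "TTTG"]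
--     else:
--         return []
-- ===== Notes on version B (the rewrite author's own statement) =====
-- stated objective: alternative
-- what changed: Replaces the per-position window scan ('data[i:i+len(pam)] in pams' at every index) with a per-pattern str.find loop that jumps from hit to hit for each pam and merges the per-pattern hit lists by sorting; reverse_complement becomes a join over a complement table instead of a string-concatenation loop.
import Mathlib
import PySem

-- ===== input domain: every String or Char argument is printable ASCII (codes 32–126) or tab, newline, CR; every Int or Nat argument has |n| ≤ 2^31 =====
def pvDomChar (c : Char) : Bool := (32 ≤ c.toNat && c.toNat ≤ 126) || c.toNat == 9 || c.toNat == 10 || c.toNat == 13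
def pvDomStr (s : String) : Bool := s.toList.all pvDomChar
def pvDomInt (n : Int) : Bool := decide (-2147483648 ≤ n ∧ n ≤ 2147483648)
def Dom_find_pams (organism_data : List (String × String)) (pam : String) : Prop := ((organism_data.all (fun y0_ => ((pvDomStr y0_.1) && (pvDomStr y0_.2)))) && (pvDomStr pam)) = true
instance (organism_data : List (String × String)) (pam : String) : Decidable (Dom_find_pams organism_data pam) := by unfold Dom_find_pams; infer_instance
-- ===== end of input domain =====

-- B replaces A's per-position window scan with a per-pattern find loop whose sorted merge of the
-- per-pattern hit lists yields the same indexes (objective: alternative; no speed claim).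

-- ===== PORT A =====
-- get_pams(pam)
def get_pams (pam : String) : List String :=
  if pam = "NGG" then ["AGG", "GGG", "TGG", "CGG"]
  else if pam = "TTTV" then ["TTTA", "TTTC", "TTTG"]
  else []

-- reverse_complement(seq): seq[::-1] is List.reverse (PySem.List.slice?_none_none_neg_one);
-- the '+=' string accumulation is the same append loop over the code-point list (exact).
def reverse_complement (seq : List Char) : List Char :=
  seq.reverse.foldl (fun acc c =>
    if c = 'A' then acc ++ ['T']
    else if c = 'T' then acc ++ ['A']
    else if c = 'C' then acc ++ ['G']
    else if c = 'G' then acc ++ ['C']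
    else acc) []

-- A's inner loop: for i in range(0, len(data)-len(pam)-1): if data[i:i+len(pam)] in pams: append i
-- (string slicing/equality ported on code-point lists, which is exact)
def scan_A (m : Int) (pams : List (List Char)) (s : List Char) : List Int :=
  (PySem.List.pyRange 0 ((s.length : Int) - m - 1)).foldl
    (fun lst i => if PySem.Chars.slice s (some i) (some (i + m)) ∈ pams then lst ++ [i] else lst) []

def find_pams (organism_data : List (String × String)) (pam : String) :
    (List (String × List Int)) × (List (String × List Int)) :=
  let pams := (get_pams pam).map String.toList
  let m : Int := (pam.toList.length : Int)                 -- len(pam)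
  let d := PySem.Dict.ofList organism_data                 -- the dict Python receives
  -- forward passthrough: pam_locations[chromosome] = [] and then append inside the index loop
  let pam_locations := d.keys.foldl
    (fun acc chrom => acc.insert chrom (scan_A m pams ((d.getD chrom "").toList))) PySem.Dict.empty
  -- reverse complement passthrough
  let pam_locations_reverse_comp := d.keys.foldl
    (fun acc chrom =>
      acc.insert chrom (scan_A m pams (reverse_complement (d.getD chrom "").toList))) PySem.Dict.empty
  (pam_locations.items, pam_locations_reverse_comp.items)

-- ===== PORT B =====
def get_pams_alt (pam : String) : List String :=
  if pam = "NGG" then ["AGG", "GGG", "TGG", "CGG"]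
  else if pam = "TTTV" then ["TTTA", "TTTC", "TTTG"]
  else []

-- "".join(comp.get(c, "") for c in reversed(seq))
def rc_alt (comp : PySem.Dict Char (List Char)) (seq : List Char) : List Char :=
  seq.reverse.flatMap (fun c => comp.getD c [])

-- the 'while True' find loop of Source B; fuel = len(s)+1 bounds its iterations exactly, since
-- every next search position is strictly larger than the previous one and stays ≤ len(s)
def find_loop (s p : List Char) (limit : Int) : Int → Nat → List Int
  | _, 0 => []
  | pos, fuel+1 =>
    let idx := PySem.Chars.findFrom s p pos                -- data.find(p, pos)
    if idx = -1 ∨ limit ≤ idx then []                      -- if idx == -1 or idx >= limit: break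
    else idx :: find_loop s p limit (idx + 1) fuel

def scan_alt (m : Int) (pams : List (List Char)) (s : List Char) : List Int :=
  let limit : Int := (s.length : Int) - m - 1
  PySem.List.sorted
    (pams.foldl (fun hits p => hits ++ find_loop s p limit 0 (s.length + 1)) [])
    (fun x => x)

def find_pams_alt (organism_data : List (String × String)) (pam : String) :
    (List (String × List Int)) × (List (String × List Int)) :=
  let pams := (get_pams_alt pam).map String.toList
  let comp : PySem.Dict Char (List Char) :=
    PySem.Dict.ofList [('A', ['T']), ('T', ['A']), ('C', ['G']), ('G', ['C'])]
  let m : Int := (pam.toList.length : Int)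
  let d := PySem.Dict.ofList organism_data
  (d.items.map (fun kv => (kv.1, scan_alt m pams kv.2.toList)),
   d.items.map (fun kv => (kv.1, scan_alt m pams (rc_alt comp kv.2.toList))))

-- ===== PRECONDITION & SPEC =====
def Spec_find_pams (organism_data : List (String × String)) (pam : String) (out : (List (String × List Int)) × (List (String × List Int))) : Prop := out = find_pams_alt organism_data pam
instance (organism_data : List (String × String)) (pam : String) (out : (List (String × List Int)) × (List (String × List Int))) : Decidable (Spec_find_pams organism_data pam out) := by unfold Spec_find_pams; infer_instance

-- ===== CLAIM (what is proved, stated in full; the proofs are below) =====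
def Claim_equal_find_pams : Prop := ∀ (organism_data : List (String × String)) (pam : String), Dom_find_pams organism_data pam → Spec_find_pams organism_data pam (find_pams organism_data pam)

-- ===== LEMMAS AND PROOFS =====

-- B's complement table agrees with A's four-branch complement loop
theorem rc_alt_eq (seq : List Char) :
    rc_alt (PySem.Dict.ofList [('A', ['T']), ('T', ['A']), ('C', ['G']), ('G', ['C'])]) seq
      = reverse_complement seq := by
  unfold rc_alt reverse_complement
  have hbody : (fun (acc : List Char) (c : Char) =>
      if c = 'A' then acc ++ ['T'] else if c = 'T' then acc ++ ['A']
      else if c = 'C' then acc ++ ['G'] else if c = 'G' then acc ++ ['C'] else acc)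
      = (fun acc c => acc ++ (if c = 'A' then ['T'] else if c = 'T' then ['A']
        else if c = 'C' then ['G'] else if c = 'G' then ['C'] else [])) := by
    funext acc c; split_ifs <;> simp
  rw [hbody, PySem.List.foldl_append_eq_flatMap, List.nil_append]
  congr 1
  funext c
  by_cases hA : c = 'A'
  · subst hA; decide
  · by_cases hT : c = 'T'
    · subst hT; decide
    · by_cases hC : c = 'C'
      · subst hC; decide
      · by_cases hG : c = 'G'
        · subst hG; decide
        · simp only [hA, hT, hC, hG, if_false]
          apply PySem.Dict.getD_of_not_contains
          simp [PySem.Dict.ofList, PySem.Dict.update, PySem.Dict.contains_insert,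
            PySem.Dict.contains_empty, hA, hT, hC, hG]

-- a prefix of a later tail is an infix of an earlier tail
theorem prefix_drop_infix {s p : List Char} {pos a : Nat} (hle : pos ≤ a)
    (h : p <+: s.drop a) : p <:+: s.drop pos := by
  refine h.isInfix.trans (List.IsSuffix.isInfix ?_)
  have : s.drop a = (s.drop pos).drop (a - pos) := by
    rw [List.drop_drop]; congr 1; omega
  rw [this]; exact List.drop_suffix _ _

-- the find loop emits exactly the match positions in [pos, limit), in increasing order
theorem find_loop_eq (s p : List Char) (L : Int) (hp : p ≠ []) :
    ∀ (fuel : Nat) (pos : Nat), pos ≤ s.length → s.length + 1 - pos ≤ fuel →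
      find_loop s p L (pos : Int) fuel
        = (PySem.List.pyRange (pos : Int) L).filter (fun i => decide (p <+: s.drop i.toNat)) := by
  intro fuel
  induction fuel with
  | zero => intro pos hpos hf; omega
  | succ fuel ih =>
    intro pos hpos hf
    rw [find_loop]
    by_cases hneg : PySem.Chars.findFrom s p (pos : Int) = -1
    · rw [if_pos (Or.inl hneg)]
      symm; rw [List.filter_eq_nil_iff]
      intro a ha hmem
      rw [PySem.List.mem_pyRange_one] at ha
      have hnomatch := (PySem.Chars.findFrom_natCast_eq_neg_one_iff s p pos hpos).mp hneg
      simp only [decide_eq_true_eq] at hmem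
      exact hnomatch (prefix_drop_infix (by omega) hmem)
    · obtain ⟨hge, hpref, hmin⟩ := PySem.Chars.findFrom_natCast_spec s p pos hpos hneg
      set idx := PySem.Chars.findFrom s p (pos : Int) with hidx
      have hidx0 : 0 ≤ idx := le_trans (by positivity) hge
      have hidxlen : idx.toNat < s.length := by
        rcases List.exists_cons_of_ne_nil hp with ⟨c, t, rfl⟩
        have := hpref.length_le
        simp only [List.length_drop, List.length_cons] at this ⊢
        omega
      by_cases hbig : L ≤ idx
      · rw [if_pos (Or.inr hbig)]
        symm; rw [List.filter_eq_nil_iff]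
        intro a ha hmem
        rw [PySem.List.mem_pyRange_one] at ha
        simp only [decide_eq_true_eq] at hmem
        exact hmin a.toNat (by omega) (by omega) hmem
      · rw [if_neg (by simp only [not_or, not_le]; exact ⟨hneg, lt_of_not_ge hbig⟩)]
        have hcons : PySem.List.pyRange idx L = idx :: PySem.List.pyRange (idx + 1) L :=
          PySem.List.pyRange_one_cons (lt_of_not_ge hbig)
        have hsplit : PySem.List.pyRange (pos : Int) L
            = PySem.List.pyRange (pos : Int) idx ++ idx :: PySem.List.pyRange (idx + 1) L := by
          rw [PySem.List.pyRange_one_append (pos : Int) idx L hge (le_of_lt (lt_of_not_ge hbig)), hcons]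
        rw [hsplit, List.filter_append]
        have h1 : (PySem.List.pyRange (pos : Int) idx).filter (fun i => decide (p <+: s.drop i.toNat)) = [] := by
          rw [List.filter_eq_nil_iff]
          intro a ha hmem
          rw [PySem.List.mem_pyRange_one] at ha
          simp only [decide_eq_true_eq] at hmem
          exact hmin a.toNat (by omega) (by omega) hmem
        have h2 : ((idx : Int) + 1) = ((idx.toNat + 1 : Nat) : Int) := by omega
        rw [h1, List.nil_append, List.filter_cons_of_pos (by simpa using hpref), h2,
          ih (idx.toNat + 1) (by omega) (by omega)]

-- 'data[a:a+len(p)] == p' is 'p is a prefix of data[a:]'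
theorem slice_eq_iff_prefix (s q : List Char) (m a : Int) (ha : 0 ≤ a)
    (hq : (q.length : Int) = m) :
    PySem.Chars.slice s (some a) (some (a + m)) = q ↔ q <+: s.drop a.toNat := by
  rw [PySem.Chars.slice_eq_listSlice]
  have h1 : (some a : Option Int) = some ((a.toNat : Nat) : Int) := by congr 1; omega
  have h2 : (some (a + m) : Option Int) = some (((a.toNat + q.length : Nat) : Int)) := by congr 1; omega
  rw [h1, h2, PySem.List.slice_natCast s a.toNat (a.toNat + q.length), Nat.add_sub_cancel_left,
    List.prefix_iff_eq_take]
  exact eq_comm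

-- the per-chromosome cores agree: sorted merge of per-pattern hits = per-position window scan
theorem scan_eq (m : Int) (pams : List (List Char)) (s : List Char)
    (hlen : ∀ p ∈ pams, (p.length : Int) = m) (hne : ∀ p ∈ pams, p ≠ [])
    (hnd : pams.Nodup) :
    scan_alt m pams s = scan_A m pams s := by
  simp only [scan_alt, scan_A]
  have hA : (PySem.List.pyRange 0 ((s.length : Int) - m - 1)).foldl
      (fun lst i => if PySem.Chars.slice s (some i) (some (i + m)) ∈ pams then lst ++ [i] else lst) []
      = (PySem.List.pyRange 0 ((s.length : Int) - m - 1)).filter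
          (fun i => decide (PySem.Chars.slice s (some i) (some (i + m)) ∈ pams)) := by
    have := PySem.List.foldl_append_if
      (fun i => decide (PySem.Chars.slice s (some i) (some (i + m)) ∈ pams)) (fun i => i)
      (PySem.List.pyRange 0 ((s.length : Int) - m - 1)) []
    simpa using this
  rw [hA]
  have hB : pams.foldl (fun hits p => hits ++ find_loop s p ((s.length : Int) - m - 1) 0 (s.length + 1)) []
      = pams.flatMap (fun q => (PySem.List.pyRange 0 ((s.length : Int) - m - 1)).filter
          (fun i => decide (q <+: s.drop i.toNat))) := by
    rw [PySem.List.foldl_append_eq_flatMap, List.nil_append]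
    rw [List.flatMap_def, List.flatMap_def]
    congr 1
    apply List.map_congr_left
    intro q hq
    have h0 : ((0 : Nat) : Int) = (0 : Int) := rfl
    rw [← h0, find_loop_eq s q ((s.length : Int) - m - 1) (hne q hq) (s.length + 1) 0
      (Nat.zero_le _) (by omega)]
  rw [hB]
  apply PySem.List.sorted_eq_of_perm_of_pairwise_lt
  · -- permutation
    rw [List.perm_ext_iff_of_nodup]
    · intro a
      simp only [List.mem_filter, List.mem_flatMap, PySem.List.mem_pyRange_one, decide_eq_true_eq]
      constructor
      · rintro ⟨⟨h0, hL⟩, hmem⟩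
        exact ⟨_, hmem, ⟨⟨h0, hL⟩, (slice_eq_iff_prefix s _ m a h0 (hlen _ hmem)).mp rfl⟩⟩
      · rintro ⟨q, hq, ⟨h0, hL⟩, hpref⟩
        have := (slice_eq_iff_prefix s q m a h0 (hlen q hq)).mpr hpref
        exact ⟨⟨h0, hL⟩, this ▸ hq⟩
    · exact (PySem.List.nodup_pyRange_one _ _).filter _
    · rw [List.nodup_flatMap]
      refine ⟨fun q _ => (PySem.List.nodup_pyRange_one _ _).filter _, ?_⟩
      refine hnd.imp_of_mem ?_
      intro q q' hq hq' hqq' a haq haq'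
      simp only [List.mem_filter, decide_eq_true_eq, PySem.List.mem_pyRange_one] at haq haq'
      apply hqq'
      have hl : q.length = q'.length := by
        have e1 := hlen q hq; have e2 := hlen q' hq'; omega
      rw [List.prefix_iff_eq_take] at haq haq'
      rw [haq.2, haq'.2, hl]
  · exact (PySem.List.pairwise_lt_pyRange_one _ _).filter _

-- the candidate pam strings all have length len(pam), are nonempty and distinct
theorem pams_props (pam : String) :
    (∀ p ∈ (get_pams pam).map String.toList, (p.length : Int) = (pam.toList.length : Int) ∧ p ≠ [])
      ∧ ((get_pams pam).map String.toList).Nodup := by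
  by_cases h1 : pam = "NGG"
  · subst h1; decide
  · by_cases h2 : pam = "TTTV"
    · subst h2; decide
    · simp [get_pams, h1, h2]

-- ===== VERDICT (by name: the statement is the Claim_ definition above) =====
theorem find_pams_spec : Claim_equal_find_pams := by
  intro organism_data pam _
  unfold Spec_find_pams
  simp only [find_pams, find_pams_alt]
  have hg : get_pams_alt pam = get_pams pam := rfl
  rw [hg]
  obtain ⟨hprops, hnd⟩ := pams_props pam
  have hscan : ∀ t : List Char,
      scan_alt ((pam.toList.length : Nat) : Int) ((get_pams pam).map String.toList) t
        = scan_A ((pam.toList.length : Nat) : Int) ((get_pams pam).map String.toList) t :=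
    fun t => scan_eq _ _ t (fun p hp => (hprops p hp).1) (fun p hp => (hprops p hp).2) hnd
  simp only [String.length_toList] at hscan
  have hkeys : (PySem.Dict.ofList organism_data).keys.Nodup :=
    PySem.Dict.nodup_keys_ofList organism_data
  have hitems := PySem.Dict.items_eq_map_keys (PySem.Dict.ofList organism_data) hkeys ""
  simp only [Prod.mk.injEq]
  constructor
  · rw [PySem.Dict.items_foldl_insert_fresh _ (fun c => c) _ PySem.Dict.empty
      (fun a _ => PySem.Dict.contains_empty a) (List.map_id _ ▸ hkeys)]
    rw [hitems, List.map_map]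
    simp only [PySem.Dict.empty, List.nil_append]
    apply List.map_congr_left
    intro c _
    simp [hscan]
  · rw [PySem.Dict.items_foldl_insert_fresh _ (fun c => c) _ PySem.Dict.empty
      (fun a _ => PySem.Dict.contains_empty a) (List.map_id _ ▸ hkeys)]
    rw [hitems, List.map_map]
    simp only [PySem.Dict.empty, List.nil_append]
    apply List.map_congr_left
    intro c _
    simp [hscan, rc_alt_eq]
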